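-- pv_equiv track=rewrite | github.com/nfernan1/speedreader | Google Drive/Documents/Class/2013/ICS 33/Solutions copy/inlabexam1students/Lab 1/FuZhennan/exam/exam.py | find_influencers
-- ===== SOURCE A (Python) =====
-- from math        import ceil
--
-- def find_influencers(graph):
--     infl,cand,result = {},[],set()
--     for item in graph.items():
--         infl[item[0]] = len(item[1])-ceil(len(item[1])/2)
--     for item in infl.items():
--         cand.append((infl[item[0]],len(graph[item[0]]),item[0]))
--     while cand != []:
--         node = sorted(cand).pop(0)[-1]
--         del infl[node]
--         for item in infl:
--             if node in graph[item]:
--                 infl[item] = infl[item] -1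
--         cand = []
--         for item in infl.items():
--             if infl[item[0]] >= 0:
--                 cand.append((infl[item[0]],len(graph[item[0]]),item[0]))
--     for item in infl:
--         result.add(item)
--     return result
-- ===== SOURCE B (Python) =====
-- def find_influencers(graph):
--     # Peel min-(influence, degree, name) nodes; single min-scan per round instead of a
--     # full sort, and decrements via a reverse-adjacency index instead of scanning every
--     # remaining node's whole adjacency list.
--     infl = {u: len(vs) // 2 for u, vs in graph.items()}
--     deg = {u: len(vs) for u, vs in graph.items()}
--     rev = {}
--     for u, vs in graph.items():
--         for v in set(vs):
--             rev.setdefault(v, []).append(u)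
--     while True:
--         best = None
--         for u, f in infl.items():
--             if f >= 0:
--                 key = (f, deg[u], u)
--                 if best is None or key < best:
--                     best = key
--         if best is None:
--             break
--         node = best[2]
--         del infl[node]
--         for p in rev.get(node, ()):
--             if p in infl:
--                 infl[p] -= 1
--     return set(infl)
-- ===== Notes on version B (the rewrite author's own statement) =====
-- stated objective: faster
-- what changed: Replaces A's per-round full sort of the candidate list and per-surviving-node adjacency-list membership scans with a single linear min-scan per round plus a reverse-adjacency index built once, so each removal only decrements the influence of the removed node's actual predecessors.
import Mathlib
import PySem

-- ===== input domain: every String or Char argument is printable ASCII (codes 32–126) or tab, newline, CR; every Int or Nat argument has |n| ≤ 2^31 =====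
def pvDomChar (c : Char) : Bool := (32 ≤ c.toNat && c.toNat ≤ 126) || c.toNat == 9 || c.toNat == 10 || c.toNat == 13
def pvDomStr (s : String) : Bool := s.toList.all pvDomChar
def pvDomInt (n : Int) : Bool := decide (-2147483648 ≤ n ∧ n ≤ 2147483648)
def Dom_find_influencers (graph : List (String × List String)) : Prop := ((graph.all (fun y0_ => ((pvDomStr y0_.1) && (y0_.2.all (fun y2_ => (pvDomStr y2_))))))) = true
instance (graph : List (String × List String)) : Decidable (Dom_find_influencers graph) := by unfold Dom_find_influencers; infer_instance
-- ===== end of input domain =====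

-- B replaces A's per-round full sort and per-node adjacency-list membership scans by a
-- single min-scan per round and a reverse-adjacency index (objective: faster).


-- ===== PORT A =====
-- Python compares the (int, int, str) triples lexicographically; Lean's `<` on products is
-- pointwise, so the tuple comparison is ported by hand (exact for Python tuple `<` here).
def tripLt (a b : Int × Int × String) : Bool :=
  a.1 < b.1 || (a.1 == b.1 && (a.2.1 < b.2.1 || (a.2.1 == b.2.1 && a.2.2 < b.2.2)))

-- sorted(cand): Python's stable sort is the insertBy fold (PySem.List.sorted_eq_foldl_insertBy);
-- instantiated by hand because the elements are compared as tuples, not through an ordered key.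
def sortCand (xs : List (Int × Int × String)) : List (Int × Int × String) :=
  xs.foldl (fun acc x => PySem.List.insertBy tripLt x acc) []

-- math.ceil(n/2): the float division is exact for any list length, = (n+1)//2
def ceilHalf (n : Nat) : Int := ((n + 1) / 2 : Nat)

-- the cand-rebuilding loop at the bottom of A's while body
def candOf (gd : PySem.Dict String (List String)) (infl : PySem.Dict String Int) :
    List (Int × Int × String) :=
  infl.items.foldl (fun c it =>
    if infl.getD it.1 0 ≥ 0 then
      c ++ [(infl.getD it.1 0, ((gd.getD it.1 []).length : Int), it.1)]
    else c) []

-- A's while loop; fuel = current number of keys of infl (each iteration deletes one key,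
-- and with infl empty cand is empty, so the fuel-0 return equals the loop's exit return)
def loopA (gd : PySem.Dict String (List String)) :
    Nat → PySem.Dict String Int → List (Int × Int × String) → PySem.Dict String Int
  | 0, infl, _ => infl
  | fuel + 1, infl, cand =>
    if cand = [] then infl
    else
      match sortCand cand with
      | [] => infl   -- unreachable: cand ≠ [] and sorting permutes
      | t :: _ =>
        let node := t.2.2
        let infl1 := infl.erase node
        let infl2 := infl1.keys.foldl
          (fun d k => if (gd.getD k []).contains node then d.modify k 0 (· - 1) else d) infl1
        loopA gd fuel infl2 (candOf gd infl2)

def find_influencers (graph : List (String × List String)) : List String :=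
  let gd := PySem.Dict.ofList graph
  let infl := gd.items.foldl
    (fun d it => d.insert it.1 ((it.2.length : Int) - ceilHalf it.2.length)) PySem.Dict.empty
  let cand := infl.items.foldl
    (fun c it => c ++ [(infl.getD it.1 0, ((gd.getD it.1 []).length : Int), it.1)]) []
  let fin := loopA gd infl.size infl cand
  fin.keys.foldl (fun s k => PySem.Set.add s k) PySem.Set.empty

-- ===== PORT B =====
-- the min-scan over infl.items ('best = None; for u, f in infl.items(): …')
def scanBest (degd : PySem.Dict String Int) (infl : PySem.Dict String Int) :
    Option (Int × Int × String) :=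
  infl.items.foldl (fun (b : Option (Int × Int × String)) (it : String × Int) =>
    if it.2 ≥ 0 then
      match b with
      | none => some (it.2, degd.getD it.1 0, it.1)
      | some bb => if tripLt (it.2, degd.getD it.1 0, it.1) bb
                   then some (it.2, degd.getD it.1 0, it.1) else some bb
    else b) none

-- B's while loop; fuel as in loopA
def loopB (rev : PySem.Dict String (List String)) (degd : PySem.Dict String Int) :
    Nat → PySem.Dict String Int → PySem.Dict String Int
  | 0, infl => infl
  | fuel + 1, infl =>
    match scanBest degd infl with
    | none => infl
    | some best =>
      let node := best.2.2
      let infl1 := infl.erase node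
      let infl2 := (rev.getD node []).foldl
        (fun d p => if d.contains p then d.modify p 0 (· - 1) else d) infl1
      loopB rev degd fuel infl2

def find_influencers_alt (graph : List (String × List String)) : List String :=
  let gd := PySem.Dict.ofList graph
  let infl := gd.items.foldl
    (fun d it => d.insert it.1 (PySem.Int.floordiv (it.2.length : Int) 2)) PySem.Dict.empty
  let degd := gd.items.foldl
    (fun d it => d.insert it.1 ((it.2.length : Int))) PySem.Dict.empty
  -- rev.setdefault(v, []).append(u)  ==  rev[v] = rev.get(v, []) + [u]
  let rev := gd.items.foldl
    (fun r it => (PySem.Set.ofList it.2).foldl (fun r v => r.modify v [] (· ++ [it.1])) r)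
    PySem.Dict.empty
  let fin := loopB rev degd infl.size infl
  PySem.Set.ofList fin.keys

-- ===== PRECONDITION & SPEC =====
def Spec_find_influencers (graph : List (String × List String)) (out : List String) : Prop := out = find_influencers_alt graph
instance (graph : List (String × List String)) (out : List String) : Decidable (Spec_find_influencers graph out) := by unfold Spec_find_influencers; infer_instance

-- ===== CLAIM (what is proved, stated in full; the proofs are below) =====
def Claim_equal_find_influencers : Prop := ∀ (graph : List (String × List String)), Dom_find_influencers graph → Spec_find_influencers graph (find_influencers graph)

-- ===== LEMMAS AND PROOFS =====

def gmin (b : Option (Int × Int × String)) (x : Int × Int × String) : Option (Int × Int × String) :=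
  match b with
  | none => some x
  | some bb => if tripLt x bb then some x else some bb

theorem head_insertBy (x : Int × Int × String) (acc : List (Int × Int × String)) :
    (PySem.List.insertBy tripLt x acc).head? = gmin acc.head? x := by
  cases acc with
  | nil => simp [PySem.List.insertBy, gmin]
  | cons y ys => simp only [PySem.List.insertBy, gmin, List.head?]; split_ifs <;> simp_all

theorem head_sortCand_scan (xs : List (Int × Int × String)) (acc : List (Int × Int × String)) :
    (xs.foldl (fun acc x => PySem.List.insertBy tripLt x acc) acc).head? =
      xs.foldl gmin acc.head? := by
  induction xs generalizing acc with
  | nil => rfl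
  | cons x xs ih => simp only [List.foldl_cons, ih, head_insertBy]

theorem keys_erase (d : PySem.Dict String Int) (k : String) :
    (d.erase k).keys = d.keys.filter (fun x => !(x == k)) := by
  simp [PySem.Dict.erase, PySem.Dict.keys, List.filter_map]
  rfl

theorem keys_foldl_modify_sub (l : List String) (d : PySem.Dict String Int)
    (h : ∀ k ∈ l, d.contains k = true) :
    (l.foldl (fun d k => d.modify k 0 (· - 1)) d).keys = d.keys := by
  induction l generalizing d with
  | nil => rfl
  | cons x xs ih =>
    simp only [List.foldl_cons]
    have hx : d.contains x = true := h x (by simp)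
    have hk : (d.modify x 0 (· - 1)).keys = d.keys := by
      rw [PySem.Dict.keys_modify, PySem.Dict.keys_insert_of_contains _ _ hx]
    rw [ih _ (fun k hmem => by
      rw [PySem.Dict.contains_modify]
      simp [h k (by simp [hmem])]), hk]

theorem getD_foldl_modify_sub (l : List String) (d : PySem.Dict String Int) (v : String) :
    (l.foldl (fun d k => d.modify k 0 (· - 1)) d).getD v 0 = d.getD v 0 - l.count v := by
  induction l generalizing d with
  | nil => simp
  | cons x xs ih =>
    simp only [List.foldl_cons, ih, PySem.Dict.getD_modify, List.count_cons]
    by_cases hv : v = x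
    · subst hv; simp; omega
    · simp [hv, Ne.symm hv]

theorem foldl_contains_guard (l : List String) (d d0 : PySem.Dict String Int)
    (hk : d.keys = d0.keys) :
    (l.foldl (fun d p => if d.contains p then d.modify p 0 (· - 1) else d) d) =
      (l.filter (fun p => d0.contains p)).foldl (fun d p => d.modify p 0 (· - 1)) d := by
  induction l generalizing d with
  | nil => rfl
  | cons x xs ih =>
    have hc : d.contains x = d0.contains x := by
      rw [PySem.Dict.contains_eq_decide_mem_keys, PySem.Dict.contains_eq_decide_mem_keys, hk]
    simp only [List.foldl_cons, List.filter_cons, hc]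
    by_cases hx : d0.contains x = true
    · rw [if_pos hx, if_pos hx, List.foldl_cons]
      exact ih _ (by
        rw [PySem.Dict.keys_modify, PySem.Dict.keys_insert_of_contains _ _ (hc ▸ hx), hk])
    · rw [if_neg hx, if_neg hx]
      exact ih _ hk

theorem foldl_modify_sub_eq (d : PySem.Dict String Int) (hnd : d.keys.Nodup)
    (LA LB : List String) (hA : LA.Nodup) (hB : LB.Nodup)
    (hAk : ∀ k ∈ LA, k ∈ d.keys)
    (hmem : ∀ k, k ∈ LA ↔ k ∈ LB) :
    LA.foldl (fun d k => d.modify k 0 (· - 1)) d =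
      LB.foldl (fun d k => d.modify k 0 (· - 1)) d := by
  have hBk : ∀ k ∈ LB, k ∈ d.keys := fun k hk => hAk k ((hmem k).mpr hk)
  have hkA := keys_foldl_modify_sub LA d
    (fun k hk => (PySem.Dict.contains_iff_mem_keys _ _).mpr (hAk k hk))
  have hkB := keys_foldl_modify_sub LB d
    (fun k hk => (PySem.Dict.contains_iff_mem_keys _ _).mpr (hBk k hk))
  apply PySem.Dict.ext
  rw [PySem.Dict.items_eq_map_keys _ (by rw [hkA]; exact hnd) 0,
      PySem.Dict.items_eq_map_keys _ (by rw [hkB]; exact hnd) 0, hkA, hkB]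
  apply List.map_congr_left
  intro k hk
  rw [getD_foldl_modify_sub, getD_foldl_modify_sub]
  by_cases hin : k ∈ LA
  · rw [List.count_eq_one_of_mem hA hin, List.count_eq_one_of_mem hB ((hmem k).mp hin)]
  · rw [List.count_eq_zero_of_not_mem hin,
        List.count_eq_zero_of_not_mem (fun hc => hin ((hmem k).mpr hc))]

theorem dec_eq (gd rev : PySem.Dict String (List String)) (node : String)
    (hrev : ∀ v u, (u ∈ rev.getD v []) ↔ ∃ vs, (u, vs) ∈ gd.items ∧ v ∈ vs)
    (hrevnd : ∀ v, (rev.getD v []).Nodup)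
    (hgdnd : gd.keys.Nodup)
    (d : PySem.Dict String Int) (hnd : d.keys.Nodup)
    (hsub : ∀ k ∈ d.keys, k ∈ gd.keys) :
    d.keys.foldl (fun d k => if (gd.getD k []).contains node then d.modify k 0 (· - 1) else d) d
      = (rev.getD node []).foldl
          (fun d p => if d.contains p then d.modify p 0 (· - 1) else d) d := by
  rw [PySem.List.foldl_if_eq_foldl_filter, foldl_contains_guard _ _ _ rfl]
  apply foldl_modify_sub_eq d hnd
  · exact hnd.filter _
  · exact (hrevnd node).filter _
  · intro k hk; exact (List.mem_filter.mp hk).1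
  · intro k
    simp only [List.mem_filter]
    constructor
    · rintro ⟨hk, hcond⟩
      have hkg : k ∈ gd.keys := hsub k hk
      obtain ⟨p, hmemit, rfl⟩ := List.mem_map.mp hkg
      have hget : gd.getD p.1 [] = p.2 :=
        PySem.Dict.getD_of_mem_items _ (k := p.1) (v := p.2) hmemit hgdnd []
      refine ⟨(hrev node p.1).mpr ⟨p.2, hmemit, ?_⟩,
        (PySem.Dict.contains_iff_mem_keys _ _).mpr hk⟩
      rw [hget] at hcond
      simpa using hcond
    · rintro ⟨hkrev, hcont⟩
      obtain ⟨vs, hmemit, hnodein⟩ := (hrev node k).mp hkrev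
      have hk : k ∈ d.keys := (PySem.Dict.contains_iff_mem_keys _ _).mp hcont
      have hget : gd.getD k [] = vs := PySem.Dict.getD_of_mem_items _ hmemit hgdnd []
      refine ⟨hk, ?_⟩
      rw [hget]
      simpa using hnodein

theorem filter_beq_nodup (l : List String) (v : String) (h : l.Nodup) :
    l.filter (· == v) = if v ∈ l then [v] else [] := by
  induction l with
  | nil => simp
  | cons x xs ih =>
    rcases List.nodup_cons.mp h with ⟨hx, hxs⟩
    by_cases hv : x = v
    · subst hv
      have h0 : List.filter (· == x) xs = [] :=
        List.filter_eq_nil_iff.mpr (fun a ha hbeq =>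
          hx ((eq_of_beq hbeq :  a = x) ▸ ha))
      rw [List.filter_cons_of_pos (by simp), h0, if_pos (by simp)]
    · simp only [List.filter_cons, List.mem_cons]
      rw [if_neg (by simp [hv]), ih hxs]
      by_cases hm : v ∈ xs <;> simp [hm, Ne.symm hv]

theorem getD_inner (vs : List String) (u : String) (r : PySem.Dict String (List String))
    (v : String) :
    ((PySem.Set.ofList vs).foldl (fun r w => r.modify w [] (· ++ [u])) r).getD v []
      = r.getD v [] ++ (if vs.contains v then [u] else []) := by
  have h1 : (PySem.Set.ofList vs).foldl (fun r w => r.modify w [] (· ++ [u])) r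
      = ((PySem.Set.ofList vs).map (fun w => (w, u))).foldl
          (fun d p => d.modify p.1 [] (· ++ [p.2])) r := by
    rw [List.foldl_map]
  rw [h1, PySem.Dict.getD_foldl_modify_append]
  congr 1
  rw [List.filter_map, show ((fun p : String × String => p.1 == v) ∘ (fun w => (w, u)))
       = (· == v) from rfl,
     filter_beq_nodup _ _ (PySem.Set.nodup_ofList vs)]
  by_cases hm : v ∈ vs
  · rw [if_pos ((PySem.Set.mem_ofList vs v).mpr hm), if_pos (by simpa using hm)]
    simp
  · rw [if_neg (fun hc => hm ((PySem.Set.mem_ofList vs v).mp hc)), if_neg (by simpa using hm)]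
    simp

theorem revGetD (l : List (String × List String)) (r : PySem.Dict String (List String))
    (v : String) :
    ((l.foldl (fun r it =>
        (PySem.Set.ofList it.2).foldl (fun r w => r.modify w [] (· ++ [it.1])) r) r).getD v [])
      = r.getD v [] ++ (l.filter (fun it => it.2.contains v)).map (·.1) := by
  induction l generalizing r with
  | nil => simp
  | cons it l ih =>
    simp only [List.foldl_cons, ih, getD_inner, List.filter_cons]
    by_cases h : v ∈ it.2 <;> simp [h, List.append_assoc]

theorem length_insertBy (x : Int × Int × String) (l : List (Int × Int × String)) :
    (PySem.List.insertBy tripLt x l).length = l.length + 1 := by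
  induction l with
  | nil => rfl
  | cons y ys ih =>
    simp only [PySem.List.insertBy]
    split_ifs <;> simp [ih]

theorem length_sortCand_aux (xs acc : List (Int × Int × String)) :
    (xs.foldl (fun acc x => PySem.List.insertBy tripLt x acc) acc).length
      = acc.length + xs.length := by
  induction xs generalizing acc with
  | nil => rfl
  | cons x xs ih => simp [ih, length_insertBy]; omega

theorem sortCand_ne_nil (xs : List (Int × Int × String)) (h : xs ≠ []) :
    sortCand xs ≠ [] := by
  intro hc
  have := length_sortCand_aux xs []
  rw [show xs.foldl (fun acc x => PySem.List.insertBy tripLt x acc) [] = sortCand xs from rfl,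
     hc] at this
  simp at this
  exact h (List.length_eq_zero_iff.mp this.symm)

theorem sel_eq (gd : PySem.Dict String (List String)) (degd : PySem.Dict String Int)
    (hdeg : ∀ k, k ∈ gd.keys → degd.getD k 0 = ((gd.getD k []).length : Int))
    (infl : PySem.Dict String Int) (hnd : infl.keys.Nodup)
    (hsub : ∀ k ∈ infl.keys, k ∈ gd.keys) :
    (sortCand (candOf gd infl)).head? = scanBest degd infl := by
  have hmemkeys : ∀ it ∈ infl.items, it.1 ∈ gd.keys := by
    intro it hit
    exact hsub it.1 (List.mem_map.mpr ⟨it, hit, rfl⟩)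
  have hgetD : ∀ it ∈ infl.items, infl.getD it.1 0 = it.2 := by
    intro it hit
    exact PySem.Dict.getD_of_mem_items _ (k := it.1) (v := it.2) hit hnd 0
  have hcand : candOf gd infl =
      ((infl.items.filter (fun it => decide (it.2 ≥ 0))).map
        (fun it => ((it.2 : Int), ((gd.getD it.1 []).length : Int), it.1))) := by
    unfold candOf
    rw [PySem.List.foldl_append_ite (fun (it : String × Int) => infl.getD it.1 0 ≥ 0)
      (fun (it : String × Int) =>
        (infl.getD it.1 0, ((gd.getD it.1 []).length : Int), it.1))]
    rw [List.filter_congr (fun it hit => by rw [hgetD it hit])]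
    rw [List.map_congr_left (fun it hit => by
      rw [hgetD it (List.mem_filter.mp hit).1])]
    simp
  have hscan : scanBest degd infl =
      ((infl.items.filter (fun it => decide (it.2 ≥ 0))).map
        (fun it => ((it.2 : Int), ((gd.getD it.1 []).length : Int), it.1))).foldl gmin none := by
    unfold scanBest
    rw [show (fun (b : Option (Int × Int × String)) (it : String × Int) =>
        if it.2 ≥ 0 then
          match b with
          | none => some (it.2, degd.getD it.1 0, it.1)
          | some bb => if tripLt (it.2, degd.getD it.1 0, it.1) bb
                       then some (it.2, degd.getD it.1 0, it.1) else some bb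
        else b)
      = (fun (b : Option (Int × Int × String)) (it : String × Int) =>
          if it.2 ≥ 0 then gmin b ((it.2 : Int), degd.getD it.1 0, it.1) else b) from rfl]
    rw [PySem.List.foldl_ite_eq_foldl_filter (fun (it : String × Int) => it.2 ≥ 0)
      (fun b it => gmin b ((it.2 : Int), degd.getD it.1 0, it.1))]
    rw [← List.foldl_map (f := fun (it : String × Int) =>
      ((it.2 : Int), degd.getD it.1 0, it.1)) (g := gmin)]
    rw [List.map_congr_left (fun it hit => by
      rw [hdeg it.1 (hmemkeys it (List.mem_filter.mp hit).1)])]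
  rw [hcand, hscan]
  exact head_sortCand_scan _ []

theorem loop_eq (gd rev : PySem.Dict String (List String)) (degd : PySem.Dict String Int)
    (hrev : ∀ v u, (u ∈ rev.getD v []) ↔ ∃ vs, (u, vs) ∈ gd.items ∧ v ∈ vs)
    (hrevnd : ∀ v, (rev.getD v []).Nodup)
    (hdeg : ∀ k, k ∈ gd.keys → degd.getD k 0 = ((gd.getD k []).length : Int))
    (hgdnd : gd.keys.Nodup) :
    ∀ (fuel : Nat) (infl : PySem.Dict String Int), infl.keys.Nodup →
      (∀ k ∈ infl.keys, k ∈ gd.keys) →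
      loopA gd fuel infl (candOf gd infl) = loopB rev degd fuel infl := by
  intro fuel
  induction fuel with
  | zero => intro infl _ _; rfl
  | succ fuel ih =>
    intro infl hnd hsub
    have hsel := sel_eq gd degd hdeg infl hnd hsub
    by_cases hc : candOf gd infl = []
    · have hnone : scanBest degd infl = none := by rw [← hsel, hc]; rfl
      simp [loopA, loopB, hc, hnone]
    · have hs := sortCand_ne_nil _ hc
      obtain ⟨t, rest, ht⟩ := List.exists_cons_of_ne_nil hs
      have hscan : scanBest degd infl = some t := by rw [← hsel, ht]; rfl
      have hkeyse := keys_erase infl t.2.2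
      have hnd1 : (infl.erase t.2.2).keys.Nodup := by rw [hkeyse]; exact hnd.filter _
      have hsub1 : ∀ k ∈ (infl.erase t.2.2).keys, k ∈ gd.keys := by
        intro k hk
        rw [hkeyse] at hk
        exact hsub k (List.mem_filter.mp hk).1
      have hdec := dec_eq gd rev t.2.2 hrev hrevnd hgdnd (infl.erase t.2.2) hnd1 hsub1
      have hk2 : ((infl.erase t.2.2).keys.foldl
          (fun d k => if (gd.getD k []).contains t.2.2 then d.modify k 0 (· - 1) else d)
          (infl.erase t.2.2)).keys = (infl.erase t.2.2).keys := by
        rw [PySem.List.foldl_if_eq_foldl_filter]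
        exact keys_foldl_modify_sub _ _ (fun k hk =>
          (PySem.Dict.contains_iff_mem_keys _ _).mpr (List.mem_filter.mp hk).1)
      simp only [loopA, loopB, if_neg hc, ht, hscan]
      rw [← hdec]
      exact ih _ (by rw [hk2]; exact hnd1) (fun k hk => hsub1 k (by rw [hk2] at hk; exact hk))

theorem AB_eq (graph : List (String × List String)) :
    find_influencers graph = find_influencers_alt graph := by
  simp only [find_influencers, find_influencers_alt]
  set gd := PySem.Dict.ofList graph with hgd
  have hgdnd : gd.keys.Nodup := PySem.Dict.nodup_keys_ofList graph
  have hmapnd : (gd.items.map Prod.fst).Nodup := hgdnd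
  have hval : ∀ n : Nat, (n : Int) - ceilHalf n = PySem.Int.floordiv (n : Int) 2 := by
    intro n
    rw [PySem.Int.floordiv_eq_ediv_of_pos (by norm_num)]
    unfold ceilHalf
    omega
  have hinfl : gd.items.foldl
        (fun d it => d.insert it.1 ((it.2.length : Int) - ceilHalf it.2.length))
        PySem.Dict.empty
      = gd.items.foldl
        (fun d it => d.insert it.1 (PySem.Int.floordiv (it.2.length : Int) 2))
        PySem.Dict.empty :=
    PySem.List.foldl_congr_mem _ _ _ _ (fun acc it _ => by rw [hval])
  rw [hinfl]
  set infl := gd.items.foldl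
    (fun d it => d.insert it.1 (PySem.Int.floordiv (it.2.length : Int) 2))
    PySem.Dict.empty with hinfldef
  have hitems : infl.items
      = gd.items.map (fun it => (it.1, PySem.Int.floordiv (it.2.length : Int) 2)) := by
    rw [hinfldef]
    have := PySem.Dict.items_foldl_insert_fresh gd.items Prod.fst
      (fun it => PySem.Int.floordiv (it.2.length : Int) 2) PySem.Dict.empty
      (fun a _ => PySem.Dict.contains_empty _) hmapnd
    simpa using this
  have hkeys : infl.keys = gd.keys := by
    show infl.items.map Prod.fst = gd.items.map Prod.fst
    rw [hitems, List.map_map]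
    rfl
  have hknd : infl.keys.Nodup := by rw [hkeys]; exact hgdnd
  have hsubk : ∀ k ∈ infl.keys, k ∈ gd.keys := by rw [hkeys]; exact fun k hk => hk
  -- initial cand equals candOf
  have hcand0 : infl.items.foldl
      (fun c it => c ++ [(infl.getD it.1 0, ((gd.getD it.1 []).length : Int), it.1)]) []
      = candOf gd infl := by
    unfold candOf
    apply (PySem.List.foldl_congr_mem _ _ _ _ _).symm
    intro acc it hit
    have hg : infl.getD it.1 0 = it.2 :=
      PySem.Dict.getD_of_mem_items _ (k := it.1) (v := it.2) hit hknd 0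
    have hpos : infl.getD it.1 0 ≥ 0 := by
      rw [hg]
      rw [hitems] at hit
      obtain ⟨p, _, rfl⟩ := List.mem_map.mp hit
      show (0 : Int) ≤ PySem.Int.floordiv (p.2.length : Int) 2
      rw [PySem.Int.floordiv_eq_ediv_of_pos (by norm_num)]
      omega
    rw [if_pos hpos]
  -- degree dict
  set degd := gd.items.foldl (fun d it => d.insert it.1 ((it.2.length : Int)))
    PySem.Dict.empty with hdegdef
  have hdegitems : degd.items = gd.items.map (fun it => (it.1, (it.2.length : Int))) := by
    rw [hdegdef]
    have := PySem.Dict.items_foldl_insert_fresh gd.items Prod.fst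
      (fun it => ((it.2.length : Int))) PySem.Dict.empty
      (fun a _ => PySem.Dict.contains_empty _) hmapnd
    simpa using this
  have hdegknd : degd.keys.Nodup := by
    show (degd.items.map Prod.fst).Nodup
    rw [hdegitems, List.map_map]
    exact hmapnd
  have hdeg : ∀ k, k ∈ gd.keys → degd.getD k 0 = ((gd.getD k []).length : Int) := by
    intro k hk
    obtain ⟨p, hp, rfl⟩ := List.mem_map.mp hk
    have h1 : gd.getD p.1 [] = p.2 :=
      PySem.Dict.getD_of_mem_items _ (k := p.1) (v := p.2) hp hgdnd []
    have h2 : degd.getD p.1 0 = (p.2.length : Int) :=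
      PySem.Dict.getD_of_mem_items _ (k := p.1) (v := (p.2.length : Int))
        (by rw [hdegitems]; exact List.mem_map.mpr ⟨p, hp, rfl⟩) hdegknd 0
    rw [h1, h2]
  -- reverse index
  set rev := gd.items.foldl
    (fun r it => (PySem.Set.ofList it.2).foldl (fun r v => r.modify v [] (· ++ [it.1])) r)
    PySem.Dict.empty with hrevdef
  have hrevGetD : ∀ v, rev.getD v []
      = (gd.items.filter (fun it => it.2.contains v)).map (·.1) := by
    intro v
    rw [hrevdef, revGetD]
    simp [PySem.Dict.getD_empty]
  have hrev : ∀ v u, (u ∈ rev.getD v []) ↔ ∃ vs, (u, vs) ∈ gd.items ∧ v ∈ vs := by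
    intro v u
    rw [hrevGetD]
    simp only [List.mem_map, List.mem_filter]
    constructor
    · rintro ⟨p, ⟨hp, hc⟩, rfl⟩
      exact ⟨p.2, hp, by simpa using hc⟩
    · rintro ⟨vs, hmem, hvin⟩
      exact ⟨(u, vs), ⟨hmem, by simpa using hvin⟩, rfl⟩
  have hrevnd : ∀ v, (rev.getD v []).Nodup := by
    intro v
    rw [hrevGetD]
    exact (List.filter_sublist.map Prod.fst).nodup hgdnd
  rw [hcand0, loop_eq gd rev degd hrev hrevnd hdeg hgdnd infl.size infl hknd hsubk,
     PySem.Set.ofList_eq_foldl]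
  rfl

-- ===== VERDICT (by name: the statement is the Claim_ definition above) =====
theorem find_influencers_spec : Claim_equal_find_influencers := by
  intro graph _
  exact AB_eq graph
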